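-- pv_equiv track=rewrite | github.com/alexsalc03/DetectPhishingIS | Censys/scripts/feature_extractor_v3.py | dns_suspicious_token_count
-- ===== SOURCE A (Python) =====
-- from collections import Counter
--
-- AUTH_TOKENS = [
--     "login", "verify", "secure", "account", "update", "confirm",
--     "signin", "password", "credential", "authentication",
--     "auth", "portal", "access", "sso"
-- ]
--
-- BRAND_TOKENS = [
--     "paypal", "amazon", "microsoft", "apple", "google", "facebook",
--     "instagram", "netflix", "spotify", "t-mobile", "verizon", "att",
--     "chase", "wellsfargo", "bankofamerica", "citibank", "usbank",
--     "capitalone", "github", "linkedin", "dropbox", "meta"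
-- ]
--
-- SUSPICIOUS_TLDS = [".cc", ".tk", ".ml", ".ga", ".cf", ".gq", ".pw", ".top"]
--
-- def dns_suspicious_token_count(dns_names) -> int:
--     """
--     Conteggio euristico compatto dei segnali sospetti DNS.
--     Manteniamo questa feature ma senza duplicare dns_has_auth_token,
--     che viene rimossa come feature separata.
--     """
--     if not dns_names:
--         return 0
--
--     dns_lower = " ".join(map(str, dns_names)).lower()
--     count = 0
--
--     # auth cluster
--     if any(t in dns_lower for t in AUTH_TOKENS):
--         count += 1
--
--     # brand cluster
--     if any(t in dns_lower for t in BRAND_TOKENS):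
--         count += 1
--
--     # suspicious TLD
--     if any(tld in dns_lower for tld in SUSPICIOUS_TLDS):
--         count += 1
--
--     # prefissi ripetuti
--     prefixes = [str(n).split(".")[0] for n in dns_names if "." in str(n)]
--     prefix_counts = Counter(prefixes)
--     if any(c > 5 for c in prefix_counts.values()):
--         count += 1
--
--     # pattern numerici
--     if any(any(ch.isdigit() for ch in str(n)) for n in dns_names):
--         count += 1
--
--     # molti trattini
--     if any(str(n).count("-") >= 2 for n in dns_names):
--         count += 1
--
--     return count
-- ===== SOURCE B (Python) =====
-- from collections import Counter  # (unused; A's module imports it)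
--
-- AUTH_TOKENS = [
--     "login", "verify", "secure", "account", "update", "confirm",
--     "signin", "password", "credential", "authentication",
--     "auth", "portal", "access", "sso"
-- ]
--
-- BRAND_TOKENS = [
--     "paypal", "amazon", "microsoft", "apple", "google", "facebook",
--     "instagram", "netflix", "spotify", "t-mobile", "verizon", "att",
--     "chase", "wellsfargo", "bankofamerica", "citibank", "usbank",
--     "capitalone", "github", "linkedin", "dropbox", "meta"
-- ]
--
-- SUSPICIOUS_TLDS = [".cc", ".tk", ".ml", ".ga", ".cf", ".gq", ".pw", ".top"]
--
-- def dns_suspicious_token_count(dns_names) -> int: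
--     # One pass over the names: OR-accumulate the five per-name flags and
--     # build the prefix-count dict inline; no joined string, no extra passes.
--     auth = brand = tld = digit = dash = False
--     prefix_counts = {}
--     for raw in dns_names:
--         n = str(raw)
--         s = n.lower()
--         auth = auth or any(t in s for t in AUTH_TOKENS)
--         brand = brand or any(t in s for t in BRAND_TOKENS)
--         tld = tld or any(t in s for t in SUSPICIOUS_TLDS)
--         digit = digit or any(ch.isdigit() for ch in n)
--         dash = dash or n.count("-") >= 2
--         if "." in n:
--             p = n.split(".")[0]
--             prefix_counts[p] = prefix_counts.get(p, 0) + 1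
--     repeated = any(c > 5 for c in prefix_counts.values())
--     return int(auth) + int(brand) + int(tld) + int(repeated) + int(digit) + int(dash)
-- ===== Notes on version B (the rewrite author's own statement) =====
-- stated objective: alternative
-- what changed: B replaces A's space-joined-string token scan plus four further separate passes over dns_names by a single loop that OR-accumulates the five per-name flags and builds the prefix-count dict inline (token membership in the join equals membership in some name because no token contains a space).
import Mathlib
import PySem

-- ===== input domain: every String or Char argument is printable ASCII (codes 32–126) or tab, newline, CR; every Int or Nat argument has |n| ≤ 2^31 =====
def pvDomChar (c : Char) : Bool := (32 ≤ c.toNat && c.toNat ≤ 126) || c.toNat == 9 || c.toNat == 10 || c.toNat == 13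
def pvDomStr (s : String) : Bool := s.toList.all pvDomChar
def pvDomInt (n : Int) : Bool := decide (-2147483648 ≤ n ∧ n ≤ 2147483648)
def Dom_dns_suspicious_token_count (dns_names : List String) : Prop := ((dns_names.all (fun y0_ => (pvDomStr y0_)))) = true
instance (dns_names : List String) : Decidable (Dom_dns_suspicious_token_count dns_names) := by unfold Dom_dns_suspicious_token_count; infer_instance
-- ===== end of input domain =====

-- B replaces A's space-joined-string scan and several separate passes by a single loop over dns_names
-- that OR-accumulates the five per-name flags and builds the prefix-count dict inline (objective: alternative decomposition).

-- ===== PORT A =====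
def pvAUTH_TOKENS : List String :=
  ["login", "verify", "secure", "account", "update", "confirm",
   "signin", "password", "credential", "authentication",
   "auth", "portal", "access", "sso"]

def pvBRAND_TOKENS : List String :=
  ["paypal", "amazon", "microsoft", "apple", "google", "facebook",
   "instagram", "netflix", "spotify", "t-mobile", "verizon", "att",
   "chase", "wellsfargo", "bankofamerica", "citibank", "usbank",
   "capitalone", "github", "linkedin", "dropbox", "meta"]

def pvSUSPICIOUS_TLDS : List String :=
  [".cc", ".tk", ".ml", ".ga", ".cf", ".gq", ".pw", ".top"]

-- str(n).split(".")[0]  (split? "." is always some and nonempty, so the defaults never fire)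
def pvFirstPart (n : String) : String :=
  PySem.List.pyGetD ((PySem.Str.split? n ".").getD []) 0 ""

def dns_suspicious_token_count (dns_names : List String) : Int :=
  if dns_names = [] then 0
  else
    let dns_lower := PySem.Str.lower (PySem.Str.join " " dns_names)
    let count : Int := 0
    let count := if pvAUTH_TOKENS.any (fun t => PySem.Str.isIn t dns_lower) then count + 1 else count
    let count := if pvBRAND_TOKENS.any (fun t => PySem.Str.isIn t dns_lower) then count + 1 else count
    let count := if pvSUSPICIOUS_TLDS.any (fun t => PySem.Str.isIn t dns_lower) then count + 1 else count
    let prefixes := (dns_names.filter (fun n => PySem.Str.isIn "." n)).map pvFirstPart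
    let prefix_counts := PySem.Dict.counter prefixes
    let count := if prefix_counts.values.any (fun c => decide (c > 5)) then count + 1 else count
    let count := if dns_names.any (fun n => n.toList.any PySem.Chars.isdigit) then count + 1 else count
    let count := if dns_names.any (fun n => decide (2 ≤ PySem.Str.count n "-")) then count + 1 else count
    count

-- ===== PORT B =====
-- loop state: (auth, brand, tld, digit, dash, prefix_counts)
def pvStep (st : Bool × Bool × Bool × Bool × Bool × PySem.Dict String Int) (n : String) :
    Bool × Bool × Bool × Bool × Bool × PySem.Dict String Int :=
  let s := PySem.Str.lower n
  let auth := st.1 || pvAUTH_TOKENS.any (fun t => PySem.Str.isIn t s)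
  let brand := st.2.1 || pvBRAND_TOKENS.any (fun t => PySem.Str.isIn t s)
  let tld := st.2.2.1 || pvSUSPICIOUS_TLDS.any (fun t => PySem.Str.isIn t s)
  let digit := st.2.2.2.1 || n.toList.any PySem.Chars.isdigit
  let dash := st.2.2.2.2.1 || decide (2 ≤ PySem.Str.count n "-")
  let pc := if PySem.Str.isIn "." n then
      st.2.2.2.2.2.insert (pvFirstPart n) (st.2.2.2.2.2.getD (pvFirstPart n) 0 + 1)
    else st.2.2.2.2.2
  (auth, brand, tld, digit, dash, pc)

def dns_suspicious_token_count_alt (dns_names : List String) : Int :=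
  let st := dns_names.foldl pvStep (false, false, false, false, false, PySem.Dict.empty)
  let repeated := st.2.2.2.2.2.values.any (fun c => decide (c > 5))
  (if st.1 then (1:Int) else 0) + (if st.2.1 then 1 else 0) + (if st.2.2.1 then 1 else 0) +
    (if repeated then 1 else 0) + (if st.2.2.2.1 then 1 else 0) + (if st.2.2.2.2.1 then 1 else 0)

-- ===== PRECONDITION & SPEC =====
def Spec_dns_suspicious_token_count (dns_names : List String) (out : Int) : Prop := out = dns_suspicious_token_count_alt dns_names
instance (dns_names : List String) (out : Int) : Decidable (Spec_dns_suspicious_token_count dns_names out) := by unfold Spec_dns_suspicious_token_count; infer_instance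

-- ===== CLAIM (what is proved, stated in full; the proofs are below) =====
def Claim_equal_dns_suspicious_token_count : Prop := ∀ (dns_names : List String), Dom_dns_suspicious_token_count dns_names → Spec_dns_suspicious_token_count dns_names (dns_suspicious_token_count dns_names)

-- ===== LEMMAS AND PROOFS =====

-- a prefix of x ++ ' ' :: y that contains no space is a prefix of x
lemma pv_prefix_of_no_space {t x y : List Char} (h : t <+: x ++ ' ' :: y)
    (hs : (' ' : Char) ∉ t) : t <+: x := by
  have ht : t = (x ++ ' ' :: y).take t.length := List.prefix_iff_eq_take.mp h
  rw [List.take_append] at ht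
  by_cases hl : t.length ≤ x.length
  · have : t.length - x.length = 0 := by omega
    rw [this, List.take_zero, List.append_nil] at ht
    exact ht ▸ List.take_prefix t.length x
  · exfalso
    apply hs
    rw [ht]
    have : ' ' ∈ (' ' :: y).take (t.length - x.length) := by
      have : 0 < t.length - x.length := by omega
      cases hk : t.length - x.length with
      | zero => omega
      | succ k => simp [List.take]
    exact List.mem_append.mpr (Or.inr this)

-- a space-free nonempty word is an infix of a ++ ' ' :: b iff it is an infix of a or of b
lemma pv_infix_append_space (t : List Char) (hs : (' ' : Char) ∉ t) (hne : t ≠ []) :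
    ∀ a b : List Char, (t <:+: a ++ ' ' :: b ↔ t <:+: a ∨ t <:+: b) := by
  intro a
  induction a with
  | nil =>
    intro b
    simp only [List.nil_append, List.infix_cons_iff]
    constructor
    · rintro (hp | hi)
      · exfalso
        cases t with
        | nil => exact hne rfl
        | cons c t' =>
          rcases hp with ⟨r, hr⟩
          simp only [List.cons_append] at hr
          injection hr with h1 _
          exact hs (by simp [h1])
      · exact Or.inr hi
    · rintro (hi | hi)
      · exact absurd (List.eq_nil_of_infix_nil hi) hne
      · exact Or.inr hi
  | cons c a ih =>
    intro b
    rw [List.cons_append, List.infix_cons_iff, List.infix_cons_iff, or_assoc, ih b]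
    constructor
    · rintro (hp | h)
      · exact Or.inl (pv_prefix_of_no_space (x := c :: a) (by simpa using hp) hs)
      · exact Or.inr h
    · rintro (hp | h)
      · exact Or.inl (hp.trans (List.prefix_append _ _))
      · exact Or.inr h

-- lower distributes over the space-join
lemma pv_lower_join (ps : List (List Char)) :
    PySem.Chars.lower (PySem.Chars.join [' '] ps) =
      PySem.Chars.join [' '] (ps.map PySem.Chars.lower) := by
  induction ps with
  | nil => rfl
  | cons p rest ih =>
    cases rest with
    | nil => simp [PySem.Chars.join_singleton]
    | cons q rest' =>
      simp only [List.map_cons]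
      rw [PySem.Chars.join_cons_cons, PySem.Chars.join_cons_cons,
          show PySem.Chars.lower q :: List.map PySem.Chars.lower rest'
            = List.map PySem.Chars.lower (q :: rest') from rfl, ← ih]
      have hsp : PySem.Chars.lowerChar ' ' = ' ' := by decide
      simp [PySem.Chars.lower, hsp]

-- a space-free nonempty word occurs in the space-join iff it occurs in some part
lemma pv_isIn_join (t : List Char) (hs : (' ' : Char) ∉ t) (hne : t ≠ []) :
    ∀ ps : List (List Char), ps ≠ [] →
      PySem.Chars.isIn t (PySem.Chars.join [' '] ps) = ps.any (fun p => PySem.Chars.isIn t p) := by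
  intro ps
  induction ps with
  | nil => intro h; exact absurd rfl h
  | cons p rest ih =>
    intro _
    cases rest with
    | nil => simp [PySem.Chars.join_singleton]
    | cons q rest' =>
      rw [PySem.Chars.join_cons_cons]
      apply Bool.coe_iff_coe.mp
      rw [PySem.Chars.isIn_iff_infix]
      have hjoin : p ++ [' '] ++ PySem.Chars.join [' '] (q :: rest') =
          p ++ ' ' :: PySem.Chars.join [' '] (q :: rest') := by simp
      rw [hjoin, pv_infix_append_space t hs hne]
      rw [List.any_cons]
      simp only [Bool.or_eq_true, PySem.Chars.isIn_iff_infix]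
      rw [← ih (by simp)]
      simp [PySem.Chars.isIn_iff_infix]

-- swapping the two `any`s
lemma pv_any_swap {α β : Type} (l : List α) (m : List β) (f : α → β → Bool) :
    l.any (fun x => m.any (fun y => f x y)) = m.any (fun y => l.any (fun x => f x y)) := by
  apply Bool.coe_iff_coe.mp
  simp only [List.any_eq_true]
  tauto

-- token scan over the lowered join = per-name scan over the lowered names
lemma pv_tokens_join (toks : List String)
    (h : ∀ t ∈ toks, t.toList ≠ [] ∧ (' ' : Char) ∉ t.toList)
    (names : List String) (hne : names ≠ []) :
    toks.any (fun t => PySem.Str.isIn t (PySem.Str.lower (PySem.Str.join " " names))) =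
      names.any (fun n => toks.any (fun t => PySem.Str.isIn t (PySem.Str.lower n))) := by
  have step : ∀ t ∈ toks,
      PySem.Str.isIn t (PySem.Str.lower (PySem.Str.join " " names)) =
        names.any (fun n => PySem.Str.isIn t (PySem.Str.lower n)) := by
    intro t ht
    rw [PySem.Str.isIn_eq, PySem.Str.toList_lower, PySem.Str.toList_join]
    have hsep : (" " : String).toList = [' '] := rfl
    rw [hsep, pv_lower_join,
        pv_isIn_join t.toList (h t ht).2 (h t ht).1 _ (by simpa using hne)]
    rw [List.map_map, List.any_map]
    simp only [PySem.Str.isIn_eq, PySem.Str.toList_lower]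
    rfl
  calc toks.any (fun t => PySem.Str.isIn t (PySem.Str.lower (PySem.Str.join " " names)))
      = toks.any (fun t => names.any (fun n => PySem.Str.isIn t (PySem.Str.lower n))) := by
        apply Bool.coe_iff_coe.mp
        simp only [List.any_eq_true]
        constructor
        · rintro ⟨t, ht, hv⟩
          rw [step t ht] at hv
          exact ⟨t, ht, List.any_eq_true.mp hv⟩
        · rintro ⟨t, ht, hv⟩
          refine ⟨t, ht, ?_⟩
          rw [step t ht]
          exact List.any_eq_true.mpr hv
    _ = _ := pv_any_swap toks names _

-- the fold computes the five flags and the dict independently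
lemma pv_fold_char (l : List String) (a b t d h : Bool) (pc : PySem.Dict String Int) :
    l.foldl pvStep (a, b, t, d, h, pc) =
      (a || l.any (fun n => pvAUTH_TOKENS.any (fun tk => PySem.Str.isIn tk (PySem.Str.lower n))),
       b || l.any (fun n => pvBRAND_TOKENS.any (fun tk => PySem.Str.isIn tk (PySem.Str.lower n))),
       t || l.any (fun n => pvSUSPICIOUS_TLDS.any (fun tk => PySem.Str.isIn tk (PySem.Str.lower n))),
       d || l.any (fun n => n.toList.any PySem.Chars.isdigit),
       h || l.any (fun n => decide (2 ≤ PySem.Str.count n "-")),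
       l.foldl (fun pc n => if PySem.Str.isIn "." n then
           pc.insert (pvFirstPart n) (pc.getD (pvFirstPart n) 0 + 1) else pc) pc) := by
  induction l generalizing a b t d h pc with
  | nil => simp
  | cons x xs ih =>
    rw [List.foldl_cons, List.foldl_cons]
    rw [pvStep]
    rw [ih]
    simp only [List.any_cons, Prod.mk.injEq]
    refine ⟨by simp [Bool.or_assoc], by simp [Bool.or_assoc], by simp [Bool.or_assoc],
            by simp [Bool.or_assoc], by simp [Bool.or_assoc], trivial⟩

-- B's inline dict fold = Counter of A's prefixes list
lemma pv_dict_eq (l : List String) :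
    l.foldl (fun pc n => if PySem.Str.isIn "." n then
        pc.insert (pvFirstPart n) (pc.getD (pvFirstPart n) 0 + 1) else pc) PySem.Dict.empty =
      PySem.Dict.counter ((l.filter (fun n => PySem.Str.isIn "." n)).map pvFirstPart) := by
  rw [← PySem.Dict.foldl_insert_getD_add_one_eq_counter, List.foldl_map, List.foldl_filter]

lemma pv_auth_ok : ∀ t ∈ pvAUTH_TOKENS, t.toList ≠ [] ∧ (' ' : Char) ∉ t.toList := by decide
lemma pv_brand_ok : ∀ t ∈ pvBRAND_TOKENS, t.toList ≠ [] ∧ (' ' : Char) ∉ t.toList := by decide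
lemma pv_tld_ok : ∀ t ∈ pvSUSPICIOUS_TLDS, t.toList ≠ [] ∧ (' ' : Char) ∉ t.toList := by decide

-- ===== VERDICT (by name: the statement is the Claim_ definition above) =====
set_option maxHeartbeats 2000000 in
theorem dns_suspicious_token_count_spec : Claim_equal_dns_suspicious_token_count := by
  intro dns_names _
  unfold Spec_dns_suspicious_token_count
  by_cases hne : dns_names = []
  · subst hne; rfl
  · unfold dns_suspicious_token_count dns_suspicious_token_count_alt
    rw [if_neg hne, pv_fold_char, pv_dict_eq]
    simp only []  -- zeta-reduce the let-bindings of both ports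
    rw [pv_tokens_join pvAUTH_TOKENS pv_auth_ok dns_names hne,
        pv_tokens_join pvBRAND_TOKENS pv_brand_ok dns_names hne,
        pv_tokens_join pvSUSPICIOUS_TLDS pv_tld_ok dns_names hne]
    simp only [Bool.false_or]
    split_ifs <;> ring
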